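-- pv_equiv track=rewrite | github.com/andresfredes/advent2024 | 4/main.py | get_forward_diag
-- ===== SOURCE A (Python) =====
-- def get_forward_diag(data):
--     diags = []
--     max_iter_length = len(data) + len(data[0])
--     for i in range(max_iter_length):
--         diag = ""
--         for j, line in enumerate(data):
--             x_pos = i - j
--             if x_pos < 0 or x_pos >= len(data):
--                 continue
--             diag += line[x_pos]
--         diags.append(diag)
--     return diags
-- ===== SOURCE B (Python) =====
-- def get_forward_diag(data):
--     n = len(data)
--     diags = [""] * (n + len(data[0]))
--     for j, line in enumerate(data):
--         for x in range(n):
--             diags[x + j] += line[x]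
--     return diags
-- ===== Notes on version B (the rewrite author's own statement) =====
-- stated objective: alternative
-- what changed: B replaces A's per-diagonal rescan of all rows (gather with an index test per cell) by a single pass over the rows that scatters each cell line[x] into its diagonal bucket diags[x+j], pre-allocated as len(data)+len(data[0]) empty strings.
import Mathlib
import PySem

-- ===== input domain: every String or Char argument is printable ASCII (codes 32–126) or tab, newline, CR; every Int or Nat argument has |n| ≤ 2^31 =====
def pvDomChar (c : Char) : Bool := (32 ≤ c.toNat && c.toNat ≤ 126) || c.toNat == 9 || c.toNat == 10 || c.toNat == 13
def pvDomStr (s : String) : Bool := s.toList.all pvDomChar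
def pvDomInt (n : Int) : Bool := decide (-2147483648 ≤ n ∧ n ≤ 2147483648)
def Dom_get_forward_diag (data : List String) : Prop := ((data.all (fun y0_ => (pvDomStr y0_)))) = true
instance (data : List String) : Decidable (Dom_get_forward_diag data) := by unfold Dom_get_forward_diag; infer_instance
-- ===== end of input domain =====

-- B scatters each cell into its pre-allocated diagonal bucket in one pass over the rows,
-- instead of A's per-diagonal rescan of every row; objective: alternative algorithm, same output.


-- ===== PORT A =====
-- 'line[x_pos]' as a one-char chunk on the List Char side; none (IndexError) is excluded by Pre_.
def pvCell (line : String) (x : Int) : List Char :=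
  (PySem.Str.pyGet? line x).elim [] (fun c => [c])

-- literal port of A: for each i in range(len(data)+len(data[0])) rescan all rows,
-- enumerate(data) transcribed as a fold carrying the row counter j.
def get_forward_diag (data : List String) : List String :=
  let n := data.length
  let m := (PySem.List.pyGetD data 0 "").toList.length
  (List.range (n + m)).foldl (fun diags (i : Nat) =>
    diags ++ [String.mk ((data.foldl (fun (st : Nat × List Char) line =>
        (st.1 + 1,
         if (i : Int) - (st.1 : Int) < 0 ∨ (n : Int) ≤ (i : Int) - (st.1 : Int) then st.2
         else st.2 ++ pvCell line ((i : Int) - (st.1 : Int))))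
      (0, [])).2)]) []

-- ===== PORT B =====
-- literal port of Source B: one pass over the rows (counter j), scattering line[x] into diags[x+j].
def get_forward_diag_alt (data : List String) : List String :=
  let n := data.length
  let m := (PySem.List.pyGetD data 0 "").toList.length
  ((data.foldl (fun (st : Nat × List (List Char)) line =>
      (st.1 + 1,
       (List.range n).foldl (fun ds x =>
         ds.set (x + st.1) (ds.getD (x + st.1) [] ++ pvCell line (x : Int))) st.2))
    (0, List.replicate (n + m) ([] : List Char))).2).map String.mk

-- ===== PRECONDITION & SPEC =====
-- Pre_ is exactly where the Python A returns: A raises IndexError on an empty grid (data[0])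
-- and whenever some line is shorter than the number of rows (line[x_pos] reaches x_pos < len(data)).
def Pre_get_forward_diag (data : List String) : Prop :=
  data ≠ [] ∧ ∀ line ∈ data, data.length ≤ line.toList.length
instance (data : List String) : Decidable (Pre_get_forward_diag data) := by
  unfold Pre_get_forward_diag; infer_instance
def pvWitness_get_forward_diag : List String := ["abc", "bcd", "cde"]

def Spec_get_forward_diag (data : List String) (out : List String) : Prop := out = get_forward_diag_alt data
instance (data : List String) (out : List String) : Decidable (Spec_get_forward_diag data out) := by unfold Spec_get_forward_diag; infer_instance

-- ===== CLAIM (what is proved, stated in full; the proofs are below) =====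
def Claim_equal_get_forward_diag : Prop := ∀ (data : List String), Dom_get_forward_diag data → Pre_get_forward_diag data → Spec_get_forward_diag data (get_forward_diag data)

-- ===== LEMMAS AND PROOFS =====

-- the characters that rows js onward contribute to diagonal i (shared characterisation)
def pvGather (n i : Nat) : Nat → List String → List Char
  | _, [] => []
  | j, line :: rest =>
      (if j ≤ i ∧ i < j + n then pvCell line ((i - j : Nat) : Int) else []) ++ pvGather n i (j + 1) rest

-- A's inner loop over the rows equals pvGather
theorem pvA_inner (n i : Nat) (rows : List String) : ∀ (j : Nat) (acc : List Char),
    ((rows.foldl (fun (st : Nat × List Char) line =>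
        (st.1 + 1,
         if (i : Int) - (st.1 : Int) < 0 ∨ (n : Int) ≤ (i : Int) - (st.1 : Int) then st.2
         else st.2 ++ pvCell line ((i : Int) - (st.1 : Int))))
      (j, acc)).2) = acc ++ pvGather n i j rows := by
  induction rows with
  | nil => intro j acc; simp [pvGather]
  | cons line rest ih =>
      intro j acc
      simp only [List.foldl_cons, pvGather]
      rw [ih]
      by_cases h : j ≤ i ∧ i < j + n
      · have hc : ¬ ((i : Int) - (j : Int) < 0 ∨ (n : Int) ≤ (i : Int) - (j : Int)) := by omega
        have hx : (i : Int) - (j : Int) = ((i - j : Nat) : Int) := by omega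
        rw [if_neg hc, if_pos h, hx, List.append_assoc]
      · have hc : (i : Int) - (j : Int) < 0 ∨ (n : Int) ≤ (i : Int) - (j : Int) := by omega
        rw [if_pos hc, if_neg h]
        simp

-- B's inner scatter loop preserves length
theorem pvB_len (line : String) (j : Nat) : ∀ (N : Nat) (ds : List (List Char)),
    ((List.range N).foldl (fun ds x =>
        ds.set (x + j) (ds.getD (x + j) [] ++ pvCell line (x : Int))) ds).length = ds.length := by
  intro N
  induction N with
  | zero => intro ds; simp
  | succ N ih =>
      intro ds
      rw [List.range_succ, List.foldl_append]
      simp only [List.foldl_cons, List.foldl_nil, List.length_set]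
      exact ih ds

-- B's inner scatter loop, pointwise
theorem pvB_inner (line : String) : ∀ (N : Nat) (ds : List (List Char)) (j : Nat),
    j + N ≤ ds.length → ∀ (k : Nat),
    ((List.range N).foldl (fun ds x =>
        ds.set (x + j) (ds.getD (x + j) [] ++ pvCell line (x : Int))) ds)[k]?
      = ds[k]?.map (fun v => v ++ if j ≤ k ∧ k < j + N then pvCell line ((k - j : Nat) : Int) else []) := by
  intro N
  induction N with
  | zero =>
      intro ds j _ k
      simp only [List.range_zero, List.foldl_nil]
      rw [if_neg (by omega)]
      cases ds[k]? <;> simp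
  | succ N ih =>
      intro ds j hle k
      rw [List.range_succ, List.foldl_append]
      simp only [List.foldl_cons, List.foldl_nil]
      have hlen := pvB_len line j N ds
      have hNj : N + j < ds.length := by omega
      have hRk := ih ds j (by omega)
      have hRNj : ((List.range N).foldl (fun ds x =>
          ds.set (x + j) (ds.getD (x + j) [] ++ pvCell line (x : Int))) ds).getD (N + j) []
            = ds.getD (N + j) [] := by
        have := hRk (N + j)
        rw [List.getD, List.getD, this]
        rw [if_neg (by omega)]
        cases ds[N + j]? <;> simp
      by_cases hk : k = N + j
      · subst hk
        rw [List.getElem?_set_self (by omega : N + j < _), hRNj]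
        have hds : ds[N + j]? = some ds[N + j] := List.getElem?_eq_getElem hNj
        rw [hds]
        simp only [Option.map_some]
        have h1 : ds.getD (N + j) [] = ds[N + j] := by rw [List.getD, hds]; rfl
        rw [h1, if_pos (by omega)]
        have : (N + j - j : Nat) = N := by omega
        rw [this]
      · rw [List.getElem?_set_ne (by omega : N + j ≠ k), hRk k]
        by_cases h1 : j ≤ k ∧ k < j + N
        · rw [if_pos h1, if_pos (by omega)]
        · rw [if_neg h1, if_neg (by omega)]

-- B's outer pass, pointwise: starting at row counter j the buckets gain pvGather
theorem pvB_outer (n : Nat) : ∀ (rows : List String) (j : Nat) (ds : List (List Char)),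
    j + rows.length + n ≤ ds.length + 1 → ∀ (k : Nat),
    ((rows.foldl (fun (st : Nat × List (List Char)) line =>
        (st.1 + 1,
         (List.range n).foldl (fun ds x =>
           ds.set (x + st.1) (ds.getD (x + st.1) [] ++ pvCell line (x : Int))) st.2))
      (j, ds)).2)[k]? = ds[k]?.map (fun v => v ++ pvGather n k j rows) := by
  intro rows
  induction rows with
  | nil =>
      intro j ds _ k
      simp only [List.foldl_nil, pvGather]
      cases ds[k]? <;> simp
  | cons line rest ih =>
      intro j ds hle k
      simp only [List.foldl_cons]
      have hlen : ((List.range n).foldl (fun ds x =>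
          ds.set (x + j) (ds.getD (x + j) [] ++ pvCell line (x : Int))) ds).length = ds.length :=
        pvB_len line j n ds
      have hle' : (j + 1) + rest.length + n ≤ ((List.range n).foldl (fun ds x =>
          ds.set (x + j) (ds.getD (x + j) [] ++ pvCell line (x : Int))) ds).length + 1 := by
        rw [hlen]; simp only [List.length_cons] at hle; omega
      rw [ih (j + 1) _ hle' k, pvB_inner line n ds j (by simp only [List.length_cons] at hle; omega) k]
      simp only [pvGather, Option.map_map]
      cases ds[k]? <;> simp [Function.comp, List.append_assoc]

theorem pvPre_m (data : List String) (h : Pre_get_forward_diag data) :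
    data.length ≤ (PySem.List.pyGetD data 0 "").toList.length := by
  obtain ⟨hne, hall⟩ := h
  cases data with
  | nil => exact absurd rfl hne
  | cons a t =>
      have : PySem.List.pyGetD (a :: t) 0 "" = a := by
        simp [PySem.List.pyGetD_zero_cons]
      rw [this]
      exact hall a (List.mem_cons_self ..)

-- ===== VERDICT (by name: the statement is the Claim_ definition above) =====
theorem pvA_map {α : Type} (f : Nat → α) : ∀ (c : Nat) (acc : List α),
    (List.range c).foldl (fun out i => out ++ [f i]) acc = acc ++ (List.range c).map f := by
  intro c
  induction c with
  | zero => intro acc; simp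
  | succ c ih =>
      intro acc
      rw [List.range_succ, List.foldl_append, List.map_append]
      simp only [List.foldl_cons, List.foldl_nil, List.map_cons, List.map_nil]
      rw [ih, List.append_assoc]

theorem pvMain (data : List String) (n m : Nat) (hn : n = data.length) (hnm : n ≤ m) :
    (List.range (n + m)).foldl (fun diags (i : Nat) =>
      diags ++ [String.mk ((data.foldl (fun (st : Nat × List Char) line =>
          (st.1 + 1,
           if (i : Int) - (st.1 : Int) < 0 ∨ (n : Int) ≤ (i : Int) - (st.1 : Int) then st.2
           else st.2 ++ pvCell line ((i : Int) - (st.1 : Int))))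
        (0, [])).2)]) []
    = (data.foldl (fun (st : Nat × List (List Char)) line =>
        (st.1 + 1,
         (List.range n).foldl (fun ds x =>
           ds.set (x + st.1) (ds.getD (x + st.1) [] ++ pvCell line (x : Int))) st.2))
      (0, List.replicate (n + m) ([] : List Char))).2.map String.mk := by
  rw [pvA_map]
  apply List.ext_getElem?
  intro k
  rw [List.nil_append, List.getElem?_map, List.getElem?_map]
  rw [pvB_outer n data 0 (List.replicate (n + m) ([] : List Char))
      (by rw [List.length_replicate]; omega) k]
  rw [List.getElem?_replicate]
  by_cases hk : k < n + m
  · rw [if_pos hk, List.getElem?_range hk]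
    simp only [Option.map_some, List.nil_append]
    rw [pvA_inner n k data 0 []]
    simp
  · rw [if_neg hk, List.getElem?_eq_none (by simp only [List.length_range]; omega)]
    simp

theorem get_forward_diag_spec : Claim_equal_get_forward_diag := by
  intro data _ hpre
  unfold Spec_get_forward_diag get_forward_diag get_forward_diag_alt
  exact pvMain data data.length _ rfl (pvPre_m data hpre)
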